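-- pv_equiv track=rewrite | github.com/natbergu/aoc21 | 11/11.py | findadj
-- ===== SOURCE A (Python) =====
-- def findadj(point):
--     (row, col) = point
--     adjr = []
--     adjc = []
--     if row > 0:
--         adjr += [row-1]
--     if row < 9:
--         adjr += [row+1]
--     if col > 0:
--         adjc += [col-1]
--     if col < 9:
--         adjc += [col+1]
--     adj = []
--     for c in adjc:
--         adj += [(row, c)]
--     for r in adjr:
--         adj += [(r, col)]
--     for r in adjr:
--         for c in adjc:
--             adj += [(r, c)]
--     return adj
-- ===== SOURCE B (Python) =====
-- def findadj(point):
--     (row, col) = point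
--     offsets = [(0, -1), (0, 1), (-1, 0), (1, 0), (-1, -1), (-1, 1), (1, -1), (1, 1)]
--     def ok(x, d):
--         return d == 0 or (d == -1 and x > 0) or (d == 1 and x < 9)
--     return [(row + dr, col + dc) for (dr, dc) in offsets
--             if ok(row, dr) and ok(col, dc)]
-- ===== Notes on version B (the rewrite author's own statement) =====
-- stated objective: simpler
-- what changed: Replaced A's valid-row/valid-col list construction plus three separate combining passes (horizontal, vertical, diagonal cross product) with a single filtered scan over a fixed table of the 8 neighbor offsets in matching order.
import Mathlib
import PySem

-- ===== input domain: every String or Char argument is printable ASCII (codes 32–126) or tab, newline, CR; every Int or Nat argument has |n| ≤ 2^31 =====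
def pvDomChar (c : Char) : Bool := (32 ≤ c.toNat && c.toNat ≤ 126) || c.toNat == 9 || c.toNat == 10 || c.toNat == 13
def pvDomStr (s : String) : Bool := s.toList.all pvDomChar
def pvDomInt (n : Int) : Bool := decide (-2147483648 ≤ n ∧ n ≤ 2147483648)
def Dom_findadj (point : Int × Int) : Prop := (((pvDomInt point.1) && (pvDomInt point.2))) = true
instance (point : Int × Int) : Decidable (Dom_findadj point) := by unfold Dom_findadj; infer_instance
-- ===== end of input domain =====

-- B replaces A's valid-row/valid-col lists and three combining passes with a single
-- filtered scan over a fixed 8-offset table (objective: simpler decomposition).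

-- ===== PORT A =====
def findadj (point : Int × Int) : List (Int × Int) :=
  let row := point.1
  let col := point.2
  let adjr : List Int := ([] : List Int)
  let adjc : List Int := ([] : List Int)
  let adjr := if row > 0 then adjr ++ [row - 1] else adjr
  let adjr := if row < 9 then adjr ++ [row + 1] else adjr
  let adjc := if col > 0 then adjc ++ [col - 1] else adjc
  let adjc := if col < 9 then adjc ++ [col + 1] else adjc
  let adj : List (Int × Int) := []
  let adj := adjc.foldl (fun a c => a ++ [(row, c)]) adj
  let adj := adjr.foldl (fun a r => a ++ [(r, col)]) adj
  let adj := adjr.foldl (fun a r => adjc.foldl (fun a c => a ++ [(r, c)]) a) adj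
  adj

-- ===== PORT B =====
def findadjOk (x d : Int) : Bool := d == 0 || (d == -1 && x > 0) || (d == 1 && x < 9)

def findadj_alt (point : Int × Int) : List (Int × Int) :=
  let row := point.1
  let col := point.2
  let offsets : List (Int × Int) :=
    [(0, -1), (0, 1), (-1, 0), (1, 0), (-1, -1), (-1, 1), (1, -1), (1, 1)]
  (offsets.filter (fun p => findadjOk row p.1 && findadjOk col p.2)).map
    (fun p => (row + p.1, col + p.2))

-- ===== PRECONDITION & SPEC =====
def Spec_findadj (point : Int × Int) (out : List (Int × Int)) : Prop := out = findadj_alt point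
instance (point : Int × Int) (out : List (Int × Int)) : Decidable (Spec_findadj point out) := by unfold Spec_findadj; infer_instance

-- ===== CLAIM (what is proved, stated in full; the proofs are below) =====
def Claim_equal_findadj : Prop := ∀ (point : Int × Int), Dom_findadj point → Spec_findadj point (findadj point)

-- ===== LEMMAS AND PROOFS =====

-- ===== VERDICT (by name: the statement is the Claim_ definition above) =====
theorem findadj_spec : Claim_equal_findadj := by
  intro point _
  obtain ⟨row, col⟩ := point
  unfold Spec_findadj findadj findadj_alt findadjOk
  by_cases h1 : row > 0 <;> by_cases h2 : row < 9 <;>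
    by_cases h3 : col > 0 <;> by_cases h4 : col < 9 <;>
    simp [h1, h2, h3, h4, List.foldl, List.filter, List.map] <;> omega
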